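-- pv_equiv track=rewrite | github.com/justinliang1020/advent-of-code | day1/puzzle2.py | is_number_string
-- ===== SOURCE A (Python) =====
-- def is_number_string(s: str, i: int) -> (bool, int):
--     number_strings = {
--         "one": 1,
--         "two": 2,
--         "three": 3,
--         "four": 4,
--         "five": 5,
--         "six": 6,
--         "seven": 7,
--         "eight": 8,
--         "nine": 9,
--     }
--     s_length = len(s)
--     for ns in number_strings.keys():
--         l = len(ns)
--         if i + l > s_length:
--             continue
--         if s[i : i + l] == ns:
--             return True, number_strings[ns]
--     return False, 0
-- ===== SOURCE B (Python) =====
-- _DISPATCH = {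
--     "one": ("one", 1), "two": ("two", 2), "six": ("six", 6),
--     "fou": ("four", 4), "fiv": ("five", 5), "nin": ("nine", 9),
--     "thr": ("three", 3), "sev": ("seven", 7), "eig": ("eight", 8),
-- }
--
--
-- def is_number_string(s: str, i: int) -> (bool, int):
--     # Loop-free: the 3-char slice at i uniquely determines the only possible
--     # candidate word (all nine words have distinct 3-letter prefixes); verify it.
--     if i + 3 > len(s):
--         return False, 0
--     hit = _DISPATCH.get(s[i : i + 3])
--     if hit is None:
--         return False, 0
--     w, v = hit
--     if len(w) == 3:
--         return True, v
--     if i + len(w) > len(s):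
--         return False, 0
--     if s[i : i + len(w)] == w:
--         return True, v
--     return False, 0
-- ===== Notes on version B (the rewrite author's own statement) =====
-- stated objective: alternative
-- what changed: Replaces A's loop over nine words (one guarded slice comparison each) by a loop-free dispatch-then-verify: a single 3-char slice looked up in a prefix dict selects the unique candidate word (the nine words have pairwise distinct 3-letter prefixes), followed by at most one verification slice for length-4/5 candidates.
import Mathlib
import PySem

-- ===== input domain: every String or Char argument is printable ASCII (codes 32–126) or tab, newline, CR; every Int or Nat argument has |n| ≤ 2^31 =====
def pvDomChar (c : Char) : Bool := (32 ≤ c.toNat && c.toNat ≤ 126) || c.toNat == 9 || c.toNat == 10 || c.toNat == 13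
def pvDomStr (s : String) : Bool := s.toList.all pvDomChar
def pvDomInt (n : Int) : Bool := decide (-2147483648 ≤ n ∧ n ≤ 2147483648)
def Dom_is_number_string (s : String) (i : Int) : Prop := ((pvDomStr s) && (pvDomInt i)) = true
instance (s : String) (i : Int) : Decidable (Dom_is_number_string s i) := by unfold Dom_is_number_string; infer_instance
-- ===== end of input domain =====

-- B replaces A's scan over the nine number words by a loop-free dispatch-then-verify:
-- one 3-char slice is looked up in a prefix dict to select the unique candidate word,
-- followed by at most one verification slice (alternative decomposition, same cost class).

-- ===== PORT A =====
def pvNumWords : PySem.Dict String Int := PySem.Dict.ofList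
  [("one",1),("two",2),("three",3),("four",4),("five",5),("six",6),("seven",7),("eight",8),("nine",9)]

-- the loop 'for ns in number_strings.keys(): ...' of A
def pvLoopA (s : String) (slen i : Int) : List String → Bool × Int
  | [] => (false, 0)
  | ns :: rest =>
    let l := PySem.Str.len ns
    if i + l > slen then pvLoopA s slen i rest
    else if PySem.Str.slice s (some i) (some (i + l)) = ns then
      (true, (pvNumWords.get? ns).getD 0)   -- number_strings[ns]: ns is a key of the dict, so get? always hits
    else pvLoopA s slen i rest

def is_number_string (s : String) (i : Int) : Bool × Int :=
  pvLoopA s (PySem.Str.len s) i pvNumWords.keys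

-- ===== PORT B =====
def pvDispatch : PySem.Dict String (String × Int) := PySem.Dict.ofList
  [("one",("one",1)),("two",("two",2)),("six",("six",6)),
   ("fou",("four",4)),("fiv",("five",5)),("nin",("nine",9)),
   ("thr",("three",3)),("sev",("seven",7)),("eig",("eight",8))]

def is_number_string_alt (s : String) (i : Int) : Bool × Int :=
  let n := PySem.Str.len s
  if i + 3 > n then (false, 0)
  else
    match pvDispatch.get? (PySem.Str.slice s (some i) (some (i + 3))) with
    | none => (false, 0)
    | some (w, v) =>
      if PySem.Str.len w = 3 then (true, v)
      else if i + PySem.Str.len w > n then (false, 0)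
      else if PySem.Str.slice s (some i) (some (i + PySem.Str.len w)) = w then (true, v)
      else (false, 0)

-- ===== PRECONDITION & SPEC =====
def Spec_is_number_string (s : String) (i : Int) (out : Bool × Int) : Prop := out = is_number_string_alt s i
instance (s : String) (i : Int) (out : Bool × Int) : Decidable (Spec_is_number_string s i out) := by unfold Spec_is_number_string; infer_instance

-- ===== CLAIM (what is proved, stated in full; the proofs are below) =====
def Claim_equal_is_number_string : Prop := ∀ (s : String) (i : Int), Dom_is_number_string s i → Spec_is_number_string s i (is_number_string s i)

-- ===== LEMMAS AND PROOFS =====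
-- clamp additivity transfers down to shorter offsets
lemma pv_clamp (n : ℕ) (i : Int) (a b : ℕ) (hab : a ≤ b)
    (h : PySem.List.clampIdx n (i+b) = PySem.List.clampIdx n i + b) :
    PySem.List.clampIdx n (i+a) = PySem.List.clampIdx n i + a := by
  simp only [PySem.List.clampIdx] at *
  split_ifs at * <;> omega

-- if the slice s[i:i+b] equals a full-length-b word, then s[i:i+a] (a ≤ b) is its length-a prefix
lemma pv_conflict (s : String) (i : Int) (a b : ℕ) (hab : a ≤ b) (hb : 0 < b) (w : String)
    (hw : w.toList.length = b)
    (h : PySem.Str.slice s (some i) (some (i + (b:Int))) = w) :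
    (PySem.Str.slice s (some i) (some (i + (a:Int)))).toList = w.toList.take a := by
  have h' : PySem.List.slice s.toList (some i) (some (i+(b:Int))) = w.toList := by
    rw [← h]; simp [PySem.Str.toList_slice]
  have hn : s.toList.length = s.length := by simp
  have hlen : PySem.List.clampIdx s.length (i+(b:Int)) - PySem.List.clampIdx s.length i = b := by
    have := PySem.List.length_slice s.toList i (i+(b:Int))
    rw [h', hw, hn] at this; omega
  have hle1 := PySem.List.clampIdx_le s.length (i+(b:Int))
  have hle2 := PySem.List.clampIdx_le s.length (i+(a:Int))
  have hbb : PySem.List.clampIdx s.length (i+(b:Int)) = PySem.List.clampIdx s.length i + b := by omega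
  have haa := pv_clamp s.length i a b hab hbb
  have e1 : (PySem.Str.slice s (some i) (some (i + (a:Int)))).toList
      = List.take a (List.drop (PySem.List.clampIdx s.length i) s.toList) := by
    simp [PySem.Str.toList_slice, PySem.List.slice, hn, haa]
  have e2 : w.toList = List.take b (List.drop (PySem.List.clampIdx s.length i) s.toList) := by
    rw [← h']; simp [PySem.List.slice, hn, hbb]
  rw [e1, e2, List.take_take, Nat.min_eq_left hab]

-- a mismatch of the 3-char slice with a word's 3-prefix rules out the full-word match
lemma pv_npre (s : String) (i : Int) (w pre : String) (b : ℕ) (hb : w.toList.length = b)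
    (h3b : 3 ≤ b) (hpre : w.toList.take 3 = pre.toList)
    (hne : PySem.Str.slice s (some i) (some (i + 3)) ≠ pre) :
    PySem.Str.slice s (some i) (some (i + (b : Int))) ≠ w := by
  intro h
  apply hne
  have h3 := pv_conflict s i 3 b h3b (by omega) w hb h
  rw [hpre] at h3
  have h4 := congrArg String.ofList h3
  simpa [PySem.Str.slice] using h4

theorem pv_main (s : String) (i : Int) : is_number_string s i = is_number_string_alt s i := by
  have hk : pvNumWords.keys = ["one","two","three","four","five","six","seven","eight","nine"] := by decide
  have EN : pvNumWords = PySem.Dict.mk [("one",1),("two",2),("three",3),("four",4),("five",5),("six",6),("seven",7),("eight",8),("nine",9)] := by decide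
  have ED : pvDispatch = PySem.Dict.mk [("one",("one",1)),("two",("two",2)),("six",("six",6)),("fou",("four",4)),("fiv",("five",5)),("nin",("nine",9)),("thr",("three",3)),("sev",("seven",7)),("eig",("eight",8))] := by decide
  unfold is_number_string is_number_string_alt
  rw [hk]
  by_cases g3 : (s.length:Int) < i + 3
  · have g4 : (s.length:Int) < i + 4 := by omega
    have g5 : (s.length:Int) < i + 5 := by omega
    simp [pvLoopA, EN, ED, PySem.Dict.get?_mk_cons, beq_iff_eq, g3, g4, g5]
  · by_cases c1 : PySem.Str.slice s (some i) (some (i + 3)) = "one"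
    · simp [pvLoopA, EN, ED, PySem.Dict.get?_mk_cons, beq_iff_eq, g3, c1]
    · by_cases c2 : PySem.Str.slice s (some i) (some (i + 3)) = "two"
      · simp [pvLoopA, EN, ED, PySem.Dict.get?_mk_cons, beq_iff_eq, g3, c1, Ne.symm c1, c2]
      · by_cases c6 : PySem.Str.slice s (some i) (some (i + 3)) = "six"
        · have n3 : PySem.Str.slice s (some i) (some (i + 5)) ≠ "three" :=
            pv_npre s i "three" "thr" 5 (by decide) (by omega) (by decide) (by rw [c6]; decide)
          have n4 : PySem.Str.slice s (some i) (some (i + 4)) ≠ "four" :=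
            pv_npre s i "four" "fou" 4 (by decide) (by omega) (by decide) (by rw [c6]; decide)
          have n5 : PySem.Str.slice s (some i) (some (i + 4)) ≠ "five" :=
            pv_npre s i "five" "fiv" 4 (by decide) (by omega) (by decide) (by rw [c6]; decide)
          simp [pvLoopA, EN, ED, PySem.Dict.get?_mk_cons, beq_iff_eq, g3, c1, Ne.symm c1, c2, Ne.symm c2, c6, n3, n4, n5]
        · -- no length-3 word matches; dispatch on the remaining six prefixes
          by_cases p3 : PySem.Str.slice s (some i) (some (i + 3)) = "thr"
          · have n4 : PySem.Str.slice s (some i) (some (i + 4)) ≠ "four" :=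
              pv_npre s i "four" "fou" 4 (by decide) (by omega) (by decide) (by rw [p3]; decide)
            have n5 : PySem.Str.slice s (some i) (some (i + 4)) ≠ "five" :=
              pv_npre s i "five" "fiv" 4 (by decide) (by omega) (by decide) (by rw [p3]; decide)
            have n9 : PySem.Str.slice s (some i) (some (i + 4)) ≠ "nine" :=
              pv_npre s i "nine" "nin" 4 (by decide) (by omega) (by decide) (by rw [p3]; decide)
            have n7 : PySem.Str.slice s (some i) (some (i + 5)) ≠ "seven" :=
              pv_npre s i "seven" "sev" 5 (by decide) (by omega) (by decide) (by rw [p3]; decide)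
            have n8 : PySem.Str.slice s (some i) (some (i + 5)) ≠ "eight" :=
              pv_npre s i "eight" "eig" 5 (by decide) (by omega) (by decide) (by rw [p3]; decide)
            by_cases g5 : (s.length:Int) < i + 5
            · simp [pvLoopA, EN, ED, PySem.Dict.get?_mk_cons, beq_iff_eq, g3, g5, c1, Ne.symm c1, c2, Ne.symm c2, c6, Ne.symm c6, p3, n4, n5, n9]
            · by_cases m : PySem.Str.slice s (some i) (some (i + 5)) = "three"
              · simp [pvLoopA, EN, ED, PySem.Dict.get?_mk_cons, beq_iff_eq, g3, g5, c1, Ne.symm c1, c2, Ne.symm c2, p3, m]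
              · simp [pvLoopA, EN, ED, PySem.Dict.get?_mk_cons, beq_iff_eq, g3, g5, c1, Ne.symm c1, c2, Ne.symm c2, c6, Ne.symm c6, p3, m, n4, n5, n9, n7, n8]
          · by_cases p4 : PySem.Str.slice s (some i) (some (i + 3)) = "fou"
            · have n3 : PySem.Str.slice s (some i) (some (i + 5)) ≠ "three" :=
                pv_npre s i "three" "thr" 5 (by decide) (by omega) (by decide) (by rw [p4]; decide)
              have n5 : PySem.Str.slice s (some i) (some (i + 4)) ≠ "five" :=
                pv_npre s i "five" "fiv" 4 (by decide) (by omega) (by decide) (by rw [p4]; decide)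
              have n9 : PySem.Str.slice s (some i) (some (i + 4)) ≠ "nine" :=
                pv_npre s i "nine" "nin" 4 (by decide) (by omega) (by decide) (by rw [p4]; decide)
              have n7 : PySem.Str.slice s (some i) (some (i + 5)) ≠ "seven" :=
                pv_npre s i "seven" "sev" 5 (by decide) (by omega) (by decide) (by rw [p4]; decide)
              have n8 : PySem.Str.slice s (some i) (some (i + 5)) ≠ "eight" :=
                pv_npre s i "eight" "eig" 5 (by decide) (by omega) (by decide) (by rw [p4]; decide)
              by_cases g4 : (s.length:Int) < i + 4
              · have g5 : (s.length:Int) < i + 5 := by omega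
                simp [pvLoopA, EN, ED, PySem.Dict.get?_mk_cons, beq_iff_eq, g3, g4, g5, c1, Ne.symm c1, c2, Ne.symm c2, c6, Ne.symm c6, p4]
              · by_cases m : PySem.Str.slice s (some i) (some (i + 4)) = "four"
                · simp [pvLoopA, EN, ED, PySem.Dict.get?_mk_cons, beq_iff_eq, g3, g4, c1, Ne.symm c1, c2, Ne.symm c2, p4, m, n3]
                · simp [pvLoopA, EN, ED, PySem.Dict.get?_mk_cons, beq_iff_eq, g3, g4, c1, Ne.symm c1, c2, Ne.symm c2, c6, Ne.symm c6, p4, m, n3, n5, n9, n7, n8]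
            · by_cases p5 : PySem.Str.slice s (some i) (some (i + 3)) = "fiv"
              · have n3 : PySem.Str.slice s (some i) (some (i + 5)) ≠ "three" :=
                  pv_npre s i "three" "thr" 5 (by decide) (by omega) (by decide) (by rw [p5]; decide)
                have n4 : PySem.Str.slice s (some i) (some (i + 4)) ≠ "four" :=
                  pv_npre s i "four" "fou" 4 (by decide) (by omega) (by decide) (by rw [p5]; decide)
                have n9 : PySem.Str.slice s (some i) (some (i + 4)) ≠ "nine" :=
                  pv_npre s i "nine" "nin" 4 (by decide) (by omega) (by decide) (by rw [p5]; decide)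
                have n7 : PySem.Str.slice s (some i) (some (i + 5)) ≠ "seven" :=
                  pv_npre s i "seven" "sev" 5 (by decide) (by omega) (by decide) (by rw [p5]; decide)
                have n8 : PySem.Str.slice s (some i) (some (i + 5)) ≠ "eight" :=
                  pv_npre s i "eight" "eig" 5 (by decide) (by omega) (by decide) (by rw [p5]; decide)
                by_cases g4 : (s.length:Int) < i + 4
                · have g5 : (s.length:Int) < i + 5 := by omega
                  simp [pvLoopA, EN, ED, PySem.Dict.get?_mk_cons, beq_iff_eq, g3, g4, g5, c1, Ne.symm c1, c2, Ne.symm c2, c6, Ne.symm c6, p5]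
                · by_cases m : PySem.Str.slice s (some i) (some (i + 4)) = "five"
                  · simp [pvLoopA, EN, ED, PySem.Dict.get?_mk_cons, beq_iff_eq, g3, g4, c1, Ne.symm c1, c2, Ne.symm c2, p5, m, n3, n4]
                  · simp [pvLoopA, EN, ED, PySem.Dict.get?_mk_cons, beq_iff_eq, g3, g4, c1, Ne.symm c1, c2, Ne.symm c2, c6, Ne.symm c6, p5, m, n3, n4, n9, n7, n8]
              · by_cases p9 : PySem.Str.slice s (some i) (some (i + 3)) = "nin"
                · have n3 : PySem.Str.slice s (some i) (some (i + 5)) ≠ "three" :=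
                    pv_npre s i "three" "thr" 5 (by decide) (by omega) (by decide) (by rw [p9]; decide)
                  have n4 : PySem.Str.slice s (some i) (some (i + 4)) ≠ "four" :=
                    pv_npre s i "four" "fou" 4 (by decide) (by omega) (by decide) (by rw [p9]; decide)
                  have n5 : PySem.Str.slice s (some i) (some (i + 4)) ≠ "five" :=
                    pv_npre s i "five" "fiv" 4 (by decide) (by omega) (by decide) (by rw [p9]; decide)
                  have n7 : PySem.Str.slice s (some i) (some (i + 5)) ≠ "seven" :=
                    pv_npre s i "seven" "sev" 5 (by decide) (by omega) (by decide) (by rw [p9]; decide)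
                  have n8 : PySem.Str.slice s (some i) (some (i + 5)) ≠ "eight" :=
                    pv_npre s i "eight" "eig" 5 (by decide) (by omega) (by decide) (by rw [p9]; decide)
                  by_cases g4 : (s.length:Int) < i + 4
                  · have g5 : (s.length:Int) < i + 5 := by omega
                    simp [pvLoopA, EN, ED, PySem.Dict.get?_mk_cons, beq_iff_eq, g3, g4, g5, c1, Ne.symm c1, c2, Ne.symm c2, c6, Ne.symm c6, p9]
                  · by_cases m : PySem.Str.slice s (some i) (some (i + 4)) = "nine"
                    · simp [pvLoopA, EN, ED, PySem.Dict.get?_mk_cons, beq_iff_eq, g3, g4, c1, Ne.symm c1, c2, Ne.symm c2, p9, m, n3, n4, n5, n7, n8]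
                    · simp [pvLoopA, EN, ED, PySem.Dict.get?_mk_cons, beq_iff_eq, g3, g4, c1, Ne.symm c1, c2, Ne.symm c2, c6, Ne.symm c6, p9, m, n3, n4, n5, n7, n8]
                · by_cases p7 : PySem.Str.slice s (some i) (some (i + 3)) = "sev"
                  · have n3 : PySem.Str.slice s (some i) (some (i + 5)) ≠ "three" :=
                      pv_npre s i "three" "thr" 5 (by decide) (by omega) (by decide) (by rw [p7]; decide)
                    have n4 : PySem.Str.slice s (some i) (some (i + 4)) ≠ "four" :=
                      pv_npre s i "four" "fou" 4 (by decide) (by omega) (by decide) (by rw [p7]; decide)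
                    have n5 : PySem.Str.slice s (some i) (some (i + 4)) ≠ "five" :=
                      pv_npre s i "five" "fiv" 4 (by decide) (by omega) (by decide) (by rw [p7]; decide)
                    have n9 : PySem.Str.slice s (some i) (some (i + 4)) ≠ "nine" :=
                      pv_npre s i "nine" "nin" 4 (by decide) (by omega) (by decide) (by rw [p7]; decide)
                    have n8 : PySem.Str.slice s (some i) (some (i + 5)) ≠ "eight" :=
                      pv_npre s i "eight" "eig" 5 (by decide) (by omega) (by decide) (by rw [p7]; decide)
                    by_cases g5 : (s.length:Int) < i + 5
                    · simp [pvLoopA, EN, ED, PySem.Dict.get?_mk_cons, beq_iff_eq, g3, g5, c1, Ne.symm c1, c2, Ne.symm c2, c6, Ne.symm c6, p7, n4, n5, n9]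
                    · by_cases m : PySem.Str.slice s (some i) (some (i + 5)) = "seven"
                      · simp [pvLoopA, EN, ED, PySem.Dict.get?_mk_cons, beq_iff_eq, g3, g5, c1, Ne.symm c1, c2, Ne.symm c2, p7, m, n3, n4, n5]
                      · simp [pvLoopA, EN, ED, PySem.Dict.get?_mk_cons, beq_iff_eq, g3, g5, c1, Ne.symm c1, c2, Ne.symm c2, c6, Ne.symm c6, p7, m, n3, n4, n5, n9, n8]
                  · by_cases p8 : PySem.Str.slice s (some i) (some (i + 3)) = "eig"
                    · have n3 : PySem.Str.slice s (some i) (some (i + 5)) ≠ "three" :=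
                        pv_npre s i "three" "thr" 5 (by decide) (by omega) (by decide) (by rw [p8]; decide)
                      have n4 : PySem.Str.slice s (some i) (some (i + 4)) ≠ "four" :=
                        pv_npre s i "four" "fou" 4 (by decide) (by omega) (by decide) (by rw [p8]; decide)
                      have n5 : PySem.Str.slice s (some i) (some (i + 4)) ≠ "five" :=
                        pv_npre s i "five" "fiv" 4 (by decide) (by omega) (by decide) (by rw [p8]; decide)
                      have n9 : PySem.Str.slice s (some i) (some (i + 4)) ≠ "nine" :=
                        pv_npre s i "nine" "nin" 4 (by decide) (by omega) (by decide) (by rw [p8]; decide)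
                      have n7 : PySem.Str.slice s (some i) (some (i + 5)) ≠ "seven" :=
                        pv_npre s i "seven" "sev" 5 (by decide) (by omega) (by decide) (by rw [p8]; decide)
                      by_cases g5 : (s.length:Int) < i + 5
                      · simp [pvLoopA, EN, ED, PySem.Dict.get?_mk_cons, beq_iff_eq, g3, g5, c1, Ne.symm c1, c2, Ne.symm c2, c6, Ne.symm c6, p8, n4, n5, n9]
                      · by_cases m : PySem.Str.slice s (some i) (some (i + 5)) = "eight"
                        · simp [pvLoopA, EN, ED, PySem.Dict.get?_mk_cons, beq_iff_eq, g3, g5, c1, Ne.symm c1, c2, Ne.symm c2, p8, m, n3, n4, n5, n7]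
                        · simp [pvLoopA, EN, ED, PySem.Dict.get?_mk_cons, beq_iff_eq, g3, g5, c1, Ne.symm c1, c2, Ne.symm c2, c6, Ne.symm c6, p8, m, n3, n4, n5, n9, n7]
                    · -- the 3-char slice matches no prefix: both sides return (false, 0)
                      have n3 : PySem.Str.slice s (some i) (some (i + 5)) ≠ "three" :=
                        pv_npre s i "three" "thr" 5 (by decide) (by omega) (by decide) p3
                      have n4 : PySem.Str.slice s (some i) (some (i + 4)) ≠ "four" :=
                        pv_npre s i "four" "fou" 4 (by decide) (by omega) (by decide) p4
                      have n5 : PySem.Str.slice s (some i) (some (i + 4)) ≠ "five" :=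
                        pv_npre s i "five" "fiv" 4 (by decide) (by omega) (by decide) p5
                      have n9 : PySem.Str.slice s (some i) (some (i + 4)) ≠ "nine" :=
                        pv_npre s i "nine" "nin" 4 (by decide) (by omega) (by decide) p9
                      have n7 : PySem.Str.slice s (some i) (some (i + 5)) ≠ "seven" :=
                        pv_npre s i "seven" "sev" 5 (by decide) (by omega) (by decide) p7
                      have n8 : PySem.Str.slice s (some i) (some (i + 5)) ≠ "eight" :=
                        pv_npre s i "eight" "eig" 5 (by decide) (by omega) (by decide) p8
                      have Enil : ∀ x : String, (PySem.Dict.mk ([] : List (String × (String × Int)))).get? x = none := fun _ => rfl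
                      simp [pvLoopA, EN, ED, PySem.Dict.get?_mk_cons, Enil, beq_iff_eq, g3, c1, Ne.symm c1, c2, Ne.symm c2, c6, Ne.symm c6, p3, Ne.symm p3, p4, Ne.symm p4, p5, Ne.symm p5, p9, Ne.symm p9, p7, Ne.symm p7, p8, Ne.symm p8, n3, n4, n5, n9, n7, n8]

-- ===== VERDICT (by name: the statement is the Claim_ definition above) =====
theorem is_number_string_spec : Claim_equal_is_number_string := by
  intro s i _
  unfold Spec_is_number_string
  exact pv_main s i
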